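-- pv_equiv track=rewrite | github.com/pytorch/pytorch | torch/_inductor/analysis/utils.py | _safe_html_wrap
-- ===== SOURCE A (Python) =====
-- def _safe_html_wrap(text: str, max_width: int, compact: bool = False) -> str:
--     """Safely wrap text for HTML table context by escaping first, then wrapping with HTML breaks."""
--     # Step 1: Escape all problematic characters for HTML/XML
--     escaped_text = text.replace("&", "&amp;")
--     escaped_text = escaped_text.replace("<", "&lt;")
--     escaped_text = escaped_text.replace(">", "&gt;")
--     escaped_text = escaped_text.replace('"', "&quot;")
--     escaped_text = escaped_text.replace("'", "&#39;")
--     # Remove other problematic characters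
--     escaped_text = escaped_text.replace("[", "(")
--     escaped_text = escaped_text.replace("]", ")")
--     escaped_text = escaped_text.replace("{", "(")
--     escaped_text = escaped_text.replace("}", ")")
--
--     # Step 2: If compact mode is enabled, return the escaped text without wrapping
--     if compact:
--         return escaped_text
--
--     # Step 3: Check if wrapping is needed
--     if len(escaped_text) <= max_width:
--         return escaped_text
--
--     # Step 4: Do HTML-entity-aware wrapping
--     lines = []
--     current_line = ""
--     i = 0
--
--     while i < len(escaped_text):
--         # Check if we're at the start of an HTML entity
--         if escaped_text[i] == "&":
--             # Find the end of the HTML entity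
--             entity_end = i + 1
--             while entity_end < len(escaped_text) and escaped_text[entity_end] != ";":
--                 entity_end += 1
--             if entity_end < len(escaped_text):
--                 entity_end += 1  # Include the semicolon
--
--             entity = escaped_text[i:entity_end]
--
--             # Check if adding this entity would exceed the line limit
--             if len(current_line) + len(entity) > max_width and current_line:
--                 lines.append(current_line)
--                 current_line = entity
--             else:
--                 current_line += entity
--
--             i = entity_end
--         else:
--             # Regular character
--             if len(current_line) + 1 > max_width and current_line:
--                 lines.append(current_line)
--                 current_line = escaped_text[i]
--             else:
--                 current_line += escaped_text[i]
--             i += 1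
--
--     if current_line:
--         lines.append(current_line)
--
--     return "<BR/>".join(lines)
-- ===== SOURCE B (Python) =====
-- _ESCAPE = {"&": "&amp;", "<": "&lt;", ">": "&gt;", '"': "&quot;", "'": "&#39;",
--            "[": "(", "]": ")", "{": "(", "}": ")"}
--
--
-- def _safe_html_wrap(text: str, max_width: int, compact: bool = False) -> str:
--     """Escape for HTML via a per-character translation table, then wrap by first
--     tokenizing into units (whole '&...;' entities or single chars) and greedily
--     packing the token list into lines."""
--     escaped = "".join(_ESCAPE.get(c, c) for c in text)
--     if compact or len(escaped) <= max_width: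
--         return escaped
--     # tokenize: one unit per HTML entity "&...;" (an unterminated "&..." tail is one unit), else per character
--     tokens = []
--     j, n = 0, len(escaped)
--     while j < n:
--         if escaped[j] == "&":
--             k = escaped.find(";", j + 1)
--             k = n if k == -1 else k + 1
--             tokens.append(escaped[j:k])
--             j = k
--         else:
--             tokens.append(escaped[j])
--             j += 1
--     # greedy packing of whole tokens
--     lines = []
--     cur = ""
--     for tok in tokens:
--         if cur and len(cur) + len(tok) > max_width:
--             lines.append(cur)
--             cur = tok
--         else:
--             cur += tok
--     if cur:
--         lines.append(cur)
--     return "<BR/>".join(lines)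
-- ===== Notes on version B (the rewrite author's own statement) =====
-- stated objective: alternative
-- what changed: B replaces A's nine sequential whole-string .replace passes with a single per-character translation-table pass, and replaces A's interleaved index-scanning wrap loop with a tokenize step (whole '&...;' entity units found via str.find) followed by a separate greedy packing fold over the token list.
import Mathlib
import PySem

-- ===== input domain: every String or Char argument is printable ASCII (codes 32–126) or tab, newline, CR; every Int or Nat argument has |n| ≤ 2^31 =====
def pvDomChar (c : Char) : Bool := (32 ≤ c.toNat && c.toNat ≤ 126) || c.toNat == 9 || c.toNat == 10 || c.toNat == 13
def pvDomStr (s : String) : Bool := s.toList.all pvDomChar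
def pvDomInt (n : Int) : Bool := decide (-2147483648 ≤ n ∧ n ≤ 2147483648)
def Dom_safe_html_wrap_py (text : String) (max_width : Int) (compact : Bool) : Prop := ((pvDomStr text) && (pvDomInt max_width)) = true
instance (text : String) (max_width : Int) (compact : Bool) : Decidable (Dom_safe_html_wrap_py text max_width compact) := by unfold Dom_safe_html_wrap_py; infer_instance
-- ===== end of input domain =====

-- B replaces A's nine sequential whole-string .replace passes by a single per-character
-- translation-table pass, and A's interleaved index-scanning wrap loop by a tokenize pass
-- (str.find-based entity units) followed by a separate greedy packing fold: alternative decomposition.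

-- ===== PORT A =====

def pvA_escape (s : List Char) : List Char :=
  let e1 := PySem.Chars.replace s ['&'] "&amp;".toList
  let e2 := PySem.Chars.replace e1 ['<'] "&lt;".toList
  let e3 := PySem.Chars.replace e2 ['>'] "&gt;".toList
  let e4 := PySem.Chars.replace e3 ['"'] "&quot;".toList
  let e5 := PySem.Chars.replace e4 ['\''] "&#39;".toList
  let e6 := PySem.Chars.replace e5 ['['] ['(']
  let e7 := PySem.Chars.replace e6 [']'] [')']
  let e8 := PySem.Chars.replace e7 ['{'] ['(']
  PySem.Chars.replace e8 ['}'] [')']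

def pvA_entityEnd (es : List Char) (k : Nat) : Nat :=
  if h : k < es.length then
    if es[k] = ';' then k else pvA_entityEnd es (k + 1)
  else k
termination_by es.length - k

-- (cited by pvA_loop's decreasing_by)
lemma pvA_entityEnd_ge (es : List Char) (k : Nat) : k ≤ pvA_entityEnd es k := by
  unfold pvA_entityEnd
  split
  · split
    · exact le_refl _
    · have := pvA_entityEnd_ge es (k + 1); omega
  · exact le_refl _
termination_by es.length - k

-- A's outer "while i < len(escaped_text)" loop, state (i, lines, current_line)
def pvA_loop (es : List Char) (max_width : Int) (i : Nat) (lines : List (List Char)) (cur : List Char) : List (List Char) × List Char :=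
  if h : i < es.length then
    if es[i] = '&' then
      let e0 := pvA_entityEnd es (i + 1)
      let e := if e0 < es.length then e0 + 1 else e0
      let entity := PySem.List.slice es (some (i : Int)) (some (e : Int))
      if (cur.length : Int) + (entity.length : Int) > max_width ∧ cur ≠ [] then
        pvA_loop es max_width e (lines ++ [cur]) entity
      else
        pvA_loop es max_width e lines (cur ++ entity)
    else
      if (cur.length : Int) + 1 > max_width ∧ cur ≠ [] then
        pvA_loop es max_width (i + 1) (lines ++ [cur]) [es[i]]
      else
        pvA_loop es max_width (i + 1) lines (cur ++ [es[i]])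
  else (lines, cur)
termination_by es.length - i
decreasing_by
  all_goals have := pvA_entityEnd_ge es (i + 1)
  all_goals first
    | (split <;> omega)
    | omega

def safe_html_wrap_py (text : String) (max_width : Int) (compact : Bool) : String :=
  let es := pvA_escape text.toList
  if compact then String.ofList es
  else if (es.length : Int) ≤ max_width then String.ofList es
  else
    let st := pvA_loop es max_width 0 [] []
    let lines := if st.2 ≠ [] then st.1 ++ [st.2] else st.1
    String.ofList (PySem.Chars.join "<BR/>".toList lines)

-- ===== PORT B =====
-- the _ESCAPE dict (keys are single characters)
def pvB_table : List (Char × List Char) :=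
  [('&', "&amp;".toList), ('<', "&lt;".toList), ('>', "&gt;".toList),
   ('"', "&quot;".toList), ('\'', "&#39;".toList),
   ('[', ['(']), (']', [')']), ('{', ['(']), ('}', [')'])]

-- _ESCAPE.get(c, c)
def pvB_escChar (c : Char) : List Char := (pvB_table.lookup c).getD [c]

-- (cited by pvB_tokens's decreasing_by)
lemma pv_findFrom_ge (es : List Char) (j : Nat) (hj : j + 1 ≤ es.length)
    (hne : PySem.Chars.findFrom es [';'] ((j + 1 : Nat) : Int) ≠ -1) :
    ((j + 1 : Nat) : Int) ≤ PySem.Chars.findFrom es [';'] ((j + 1 : Nat) : Int) :=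
  (PySem.Chars.findFrom_natCast_spec es [';'] (j + 1) hj hne).1

-- Source B's tokenizer: while j < n: whole "&...;" entity via escaped.find(';', j+1), else one char
def pvB_tokens (es : List Char) (j : Nat) : List (List Char) :=
  if h : j < es.length then
    if es[j] = '&' then
      let k0 := PySem.Chars.findFrom es [';'] ((j + 1 : Nat) : Int)
      let k := if k0 = -1 then es.length else k0.toNat + 1
      PySem.List.slice es (some (j : Int)) (some (k : Int)) :: pvB_tokens es k
    else [es[j]] :: pvB_tokens es (j + 1)
  else []
termination_by es.length - j
decreasing_by
  · split
    · omega
    · rename_i hk0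
      have hge := pv_findFrom_ge es j (by omega) hk0
      omega
  · omega

-- one step of Source B's "for tok in tokens" greedy packing
def pvB_step (max_width : Int) (st : List (List Char) × List Char) (tok : List Char) : List (List Char) × List Char :=
  if st.2 ≠ [] ∧ (st.2.length : Int) + (tok.length : Int) > max_width then (st.1 ++ [st.2], tok)
  else (st.1, st.2 ++ tok)

def safe_html_wrap_py_alt (text : String) (max_width : Int) (compact : Bool) : String :=
  let escaped := text.toList.flatMap pvB_escChar
  if compact = true ∨ (escaped.length : Int) ≤ max_width then String.ofList escaped
  else
    let st := (pvB_tokens escaped 0).foldl (pvB_step max_width) ([], [])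
    let lines := if st.2 ≠ [] then st.1 ++ [st.2] else st.1
    String.ofList (PySem.Chars.join "<BR/>".toList lines)

-- ===== PRECONDITION & SPEC =====
def Spec_safe_html_wrap_py (text : String) (max_width : Int) (compact : Bool) (out : String) : Prop := out = safe_html_wrap_py_alt text max_width compact
instance (text : String) (max_width : Int) (compact : Bool) (out : String) : Decidable (Spec_safe_html_wrap_py text max_width compact out) := by unfold Spec_safe_html_wrap_py; infer_instance

-- ===== CLAIM (what is proved, stated in full; the proofs are below) =====
def Claim_equal_safe_html_wrap_py : Prop := ∀ (text : String) (max_width : Int) (compact : Bool), Dom_safe_html_wrap_py text max_width compact → Spec_safe_html_wrap_py text max_width compact (safe_html_wrap_py text max_width compact)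

-- ===== LEMMAS AND PROOFS =====

lemma pv_replace_go_single (a : Char) (nw : List Char) :
    ∀ (fuel : Nat) (l acc : List Char), l.length ≤ fuel →
      PySem.Chars.replace.go [a] nw fuel l acc
        = acc.reverse ++ l.flatMap (fun c => if c = a then nw else [c]) := by
  intro fuel
  induction fuel with
  | zero =>
    intro l acc h
    have hl : l = [] := List.eq_nil_of_length_eq_zero (Nat.le_zero.mp h)
    subst hl; simp [PySem.Chars.replace.go]
  | succ f ih =>
    intro l acc h
    cases l with
    | nil => simp [PySem.Chars.replace.go]
    | cons c t =>
      rw [PySem.Chars.replace.go]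
      by_cases hca : c = a
      · subst hca
        have hp : [c].isPrefixOf (c :: t) = true := by simp [List.isPrefixOf]
        rw [if_pos hp]
        have hd : List.drop [c].length (c :: t) = t := by simp
        rw [hd]
        simp only [List.length_cons] at h
        rw [ih _ _ (by omega)]
        simp
      · have hp : ¬ ([a].isPrefixOf (c :: t) = true) := by
          simp [List.isPrefixOf]; exact fun e => absurd e.symm hca
        rw [if_neg hp]
        simp only [List.length_cons] at h
        rw [ih _ _ (by omega)]
        simp [hca]

lemma pv_replace_single (l : List Char) (a : Char) (nw : List Char) :
    PySem.Chars.replace l [a] nw = l.flatMap (fun c => if c = a then nw else [c]) := by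
  rw [PySem.Chars.replace]
  rw [if_neg (by simp)]
  rw [pv_replace_go_single a nw l.length l [] (le_refl _)]
  simp

lemma pv_escape_eq (l : List Char) : pvA_escape l = l.flatMap pvB_escChar := by
  unfold pvA_escape
  simp only [pv_replace_single, List.flatMap_assoc]
  apply List.flatMap_congr
  intro c _
  by_cases h1 : c = '&'; · subst h1; decide
  by_cases h2 : c = '<'; · subst h2; decide
  by_cases h3 : c = '>'; · subst h3; decide
  by_cases h4 : c = '"'; · subst h4; decide
  by_cases h5 : c = '\''; · subst h5; decide
  by_cases h6 : c = '['; · subst h6; decide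
  by_cases h7 : c = ']'; · subst h7; decide
  by_cases h8 : c = '{'; · subst h8; decide
  by_cases h9 : c = '}'; · subst h9; decide
  have b1 : (c == '&') = false := by simp [h1]
  have b2 : (c == '<') = false := by simp [h2]
  have b3 : (c == '>') = false := by simp [h3]
  have b4 : (c == '"') = false := by simp [h4]
  have b5 : (c == '\'') = false := by simp [h5]
  have b6 : (c == '[') = false := by simp [h6]
  have b7 : (c == ']') = false := by simp [h7]
  have b8 : (c == '{') = false := by simp [h8]
  have b9 : (c == '}') = false := by simp [h9]
  simp [h1, h2, h3, h4, h5, h6, h7, h8, h9, b1, b2, b3, b4, b5, b6, b7, b8, b9,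
        pvB_escChar, pvB_table, List.lookup]

lemma pv_entityEnd_eq (es : List Char) (k : Nat) :
    pvA_entityEnd es k = k + ((es.drop k).takeWhile (· != ';')).length := by
  rw [pvA_entityEnd]
  by_cases h : k < es.length
  · rw [dif_pos h]
    have hdrop : es.drop k = es[k] :: es.drop (k + 1) := (List.getElem_cons_drop h).symm
    by_cases hs : es[k] = ';'
    · rw [if_pos hs, hdrop]
      simp [List.takeWhile_cons, hs]
    · rw [if_neg hs, hdrop, pv_entityEnd_eq es (k + 1)]
      simp only [List.takeWhile_cons]
      rw [if_pos (by simp [hs])]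
      simp only [List.length_cons]
      omega
  · rw [dif_neg h]
    rw [List.drop_eq_nil_iff.mpr (by omega)]
    simp
termination_by es.length - k

def pvB_tokensAux (s : List Char) : List (List Char) :=
  match s with
  | [] => []
  | c :: rest =>
    if c = '&' then
      let body := rest.takeWhile (· != ';')
      match h : rest.dropWhile (· != ';') with
      | [] => [('&' :: body)]
      | _ :: r => ('&' :: body ++ [';']) :: pvB_tokensAux r
    else [c] :: pvB_tokensAux rest
termination_by s.length
decreasing_by
  · have h1 := List.length_dropWhile_le (· != ';') rest
    rw [h] at h1; simp at h1 ⊢; omega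
  · simp

lemma pvB_tokensAux_char (c : Char) (rest : List Char) (hc : ¬ c = '&') :
    pvB_tokensAux (c :: rest) = [c] :: pvB_tokensAux rest := by
  rw [pvB_tokensAux]
  simp [hc]

lemma pvB_tokensAux_amp_none (rest : List Char) (hd : rest.dropWhile (· != ';') = []) :
    pvB_tokensAux ('&' :: rest) = [('&' :: rest.takeWhile (· != ';'))] := by
  rw [pvB_tokensAux]
  rw [if_pos rfl]
  split
  · rfl
  · rename_i heq
    rw [hd] at heq
    exact absurd heq (by simp)

lemma pvB_tokensAux_amp_cons (rest : List Char) (d : Char) (r : List Char)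
    (hd : rest.dropWhile (· != ';') = d :: r) :
    pvB_tokensAux ('&' :: rest) = ('&' :: rest.takeWhile (· != ';') ++ [';']) :: pvB_tokensAux r := by
  rw [pvB_tokensAux]
  rw [if_pos rfl]
  split
  · rename_i heq
    rw [hd] at heq
    exact absurd heq (by simp)
  · rename_i d' r' heq
    rw [hd] at heq
    cases heq
    rfl

lemma pvB_tokensAux_nil : pvB_tokensAux [] = [] := by rw [pvB_tokensAux]

lemma pv_dropWhile_eq_drop (L : List Char) (p : Char → Bool) :
    L.dropWhile p = L.drop (L.takeWhile p).length := by
  calc L.dropWhile p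
      = List.drop (L.takeWhile p).length (L.takeWhile p ++ L.dropWhile p) := (List.drop_left).symm
    _ = L.drop (L.takeWhile p).length := by rw [List.takeWhile_append_dropWhile]

lemma pv_take_takeWhile_succ (p : Char → Bool) :
    ∀ (L : List Char), List.take ((L.takeWhile p).length + 1) L
      = L.takeWhile p ++ List.take 1 (L.dropWhile p) := by
  intro L
  induction L with
  | nil => simp
  | cons x xs ih =>
    by_cases hp : p x
    · simp [List.takeWhile_cons, List.dropWhile_cons, hp, ih]
    · simp [List.takeWhile_cons, List.dropWhile_cons, hp]

lemma pv_loop_eq (es : List Char) (mw : Int) (i : Nat) (lines : List (List Char)) (cur : List Char) :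
      pvA_loop es mw i lines cur
        = (pvB_tokensAux (es.drop i)).foldl (pvB_step mw) (lines, cur) := by
  rw [pvA_loop]
  by_cases h : i < es.length
  · rw [dif_pos h]
    have hdrop : es.drop i = es[i] :: es.drop (i + 1) := (List.getElem_cons_drop h).symm
    by_cases ha : es[i] = '&'
    · rw [if_pos ha]
      have hE : pvA_entityEnd es (i + 1) = i + 1 + ((es.drop (i + 1)).takeWhile (· != ';')).length :=
        pv_entityEnd_eq es (i + 1)
      have hdw : (es.drop (i + 1)).dropWhile (· != ';')
          = es.drop (i + 1 + ((es.drop (i + 1)).takeWhile (· != ';')).length) := by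
        rw [pv_dropWhile_eq_drop, List.drop_drop]
      have hstep : ∀ tok : List Char, pvB_step mw (lines, cur) tok
          = if (cur.length : Int) + (tok.length : Int) > mw ∧ cur ≠ [] then (lines ++ [cur], tok)
            else (lines, cur ++ tok) := by
        intro tok
        rw [pvB_step]
        by_cases hc : cur ≠ [] ∧ (cur.length : Int) + (tok.length : Int) > mw
        · rw [if_pos hc, if_pos ⟨hc.2, hc.1⟩]
        · rw [if_neg hc, if_neg (fun hcc => hc ⟨hcc.2, hcc.1⟩)]
      simp only [hE]
      by_cases hlt : i + 1 + ((es.drop (i + 1)).takeWhile (· != ';')).length < es.length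
      · rw [if_pos hlt]
        have hcons : es.drop (i + 1 + ((es.drop (i + 1)).takeWhile (· != ';')).length)
            = es[i + 1 + ((es.drop (i + 1)).takeWhile (· != ';')).length]
              :: es.drop (i + 1 + ((es.drop (i + 1)).takeWhile (· != ';')).length + 1) :=
          (List.getElem_cons_drop hlt).symm
        have hne : (es.drop (i + 1)).dropWhile (· != ';') ≠ [] := by
          rw [hdw, hcons]; exact List.cons_ne_nil _ _
        have hsemi : es[i + 1 + ((es.drop (i + 1)).takeWhile (· != ';')).length] = ';' := by
          have hh := List.head_dropWhile_not (· != ';') hne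
          simp only [hdw, hcons, List.head_cons] at hh
          simpa using hh
        have hsplit : es.drop (i + 1)
            = (es.drop (i + 1)).takeWhile (· != ';')
              ++ ';' :: es.drop (i + 1 + ((es.drop (i + 1)).takeWhile (· != ';')).length + 1) := by
          conv_lhs => rw [← List.takeWhile_append_dropWhile (p := (· != ';')) (l := es.drop (i + 1))]
          rw [hdw, hcons, hsemi]
        have hent : PySem.List.slice es (some (i : Int))
              (some ((i + 1 + ((es.drop (i + 1)).takeWhile (· != ';')).length + 1 : Nat) : Int))
            = '&' :: (es.drop (i + 1)).takeWhile (· != ';') ++ [';'] := by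
          rw [PySem.List.slice_natCast, hdrop, ha]
          have harith : i + 1 + ((es.drop (i + 1)).takeWhile (· != ';')).length + 1 - i
              = ((es.drop (i + 1)).takeWhile (· != ';')).length + 1 + 1 := by omega
          rw [harith, List.take_succ_cons, pv_take_takeWhile_succ (· != ';') (es.drop (i + 1)),
              hdw, hcons, hsemi]
          simp
        rw [hent]
        rw [hdrop, ha, pvB_tokensAux_amp_cons _ ';' _ (by rw [hdw, hcons, hsemi]), List.foldl_cons, hstep]
        by_cases hc : (cur.length : Int) + (('&' :: (es.drop (i + 1)).takeWhile (· != ';') ++ [';']).length : Int) > mw ∧ cur ≠ []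
        · rw [if_pos hc, if_pos hc, pv_loop_eq es mw (i + 1 + ((es.drop (i + 1)).takeWhile (· != ';')).length + 1)]
        · rw [if_neg hc, if_neg hc, pv_loop_eq es mw (i + 1 + ((es.drop (i + 1)).takeWhile (· != ';')).length + 1)]
      · rw [if_neg hlt]
        have hnil : es.drop (i + 1 + ((es.drop (i + 1)).takeWhile (· != ';')).length) = [] :=
          List.drop_eq_nil_iff.mpr (by omega)
        have hsplit : es.drop (i + 1) = (es.drop (i + 1)).takeWhile (· != ';') := by
          conv_lhs => rw [← List.takeWhile_append_dropWhile (p := (· != ';')) (l := es.drop (i + 1))]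
          rw [hdw, hnil, List.append_nil]
        have hent : PySem.List.slice es (some (i : Int))
              (some ((i + 1 + ((es.drop (i + 1)).takeWhile (· != ';')).length : Nat) : Int))
            = '&' :: (es.drop (i + 1)).takeWhile (· != ';') := by
          rw [PySem.List.slice_natCast, hdrop, ha]
          have harith : i + 1 + ((es.drop (i + 1)).takeWhile (· != ';')).length - i
              = ((es.drop (i + 1)).takeWhile (· != ';')).length + 1 := by omega
          rw [harith, List.take_succ_cons]
          exact congrArg _ (List.prefix_iff_eq_take.mp (List.takeWhile_prefix _)).symm
        rw [hent]
        rw [hdrop, ha, pvB_tokensAux_amp_none _ (by rw [hdw, hnil]), List.foldl_cons, hstep, List.foldl_nil]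
        by_cases hc : (cur.length : Int) + (('&' :: (es.drop (i + 1)).takeWhile (· != ';')).length : Int) > mw ∧ cur ≠ []
        · rw [if_pos hc, if_pos hc, pv_loop_eq es mw (i + 1 + ((es.drop (i + 1)).takeWhile (· != ';')).length),
              show es.drop (i + 1 + ((es.drop (i + 1)).takeWhile (· != ';')).length) = [] from
                List.drop_eq_nil_iff.mpr (by omega), pvB_tokensAux_nil, List.foldl_nil]
        · rw [if_neg hc, if_neg hc, pv_loop_eq es mw (i + 1 + ((es.drop (i + 1)).takeWhile (· != ';')).length),
              show es.drop (i + 1 + ((es.drop (i + 1)).takeWhile (· != ';')).length) = [] from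
                List.drop_eq_nil_iff.mpr (by omega), pvB_tokensAux_nil, List.foldl_nil]
    · rw [if_neg ha]
      rw [hdrop, pvB_tokensAux_char _ _ ha, List.foldl_cons]
      have hstep : pvB_step mw (lines, cur) [es[i]]
          = if (cur.length : Int) + 1 > mw ∧ cur ≠ [] then (lines ++ [cur], [es[i]]) else (lines, cur ++ [es[i]]) := by
        rw [pvB_step]
        by_cases hc : cur ≠ [] ∧ (cur.length : Int) + ((([es[i]] : List Char).length : Nat) : Int) > mw
        · rw [if_pos hc, if_pos (by simpa [and_comm] using hc)]
        · rw [if_neg hc, if_neg (fun hcc => hc ⟨hcc.2, by simpa using hcc.1⟩)]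
      rw [hstep]
      by_cases hc : (cur.length : Int) + 1 > mw ∧ cur ≠ []
      · rw [if_pos hc, if_pos hc, pv_loop_eq es mw (i + 1)]
      · rw [if_neg hc, if_neg hc, pv_loop_eq es mw (i + 1)]
  · rw [dif_neg h, List.drop_eq_nil_iff.mpr (by omega), pvB_tokensAux_nil, List.foldl_nil]
termination_by es.length - i
decreasing_by all_goals omega

lemma pv_singleton_prefix (x : Char) (M : List Char) : [x] <+: M ↔ M[0]? = some x := by
  cases M with
  | nil => simp
  | cons y ys => simp [List.cons_prefix_cons, eq_comm]

lemma pv_find_semi (L : List Char) :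
    PySem.Chars.find L [';'] =
      if (L.takeWhile (· != ';')).length = L.length then -1
      else ((L.takeWhile (· != ';')).length : Int) := by
  by_cases hc : (L.takeWhile (· != ';')).length = L.length
  · rw [if_pos hc]
    rw [PySem.Chars.find_eq_neg_one_iff]
    intro hinf
    have hmem : ';' ∈ L := hinf.subset (by simp)
    have heq : L.takeWhile (· != ';') = L :=
      (List.takeWhile_prefix _).eq_of_length hc
    have := List.takeWhile_eq_self_iff.mp heq ';' hmem
    simp at this
  · rw [if_neg hc]
    have htl : (L.takeWhile (· != ';')).length < L.length :=
      lt_of_le_of_ne (List.takeWhile_prefix _).length_le hc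
    have hdw : L.dropWhile (· != ';') = L.drop (L.takeWhile (· != ';')).length :=
      pv_dropWhile_eq_drop L _
    have hcons : L.drop (L.takeWhile (· != ';')).length
        = L[(L.takeWhile (· != ';')).length] :: L.drop ((L.takeWhile (· != ';')).length + 1) :=
      (List.getElem_cons_drop htl).symm
    have hne : L.dropWhile (· != ';') ≠ [] := by
      rw [hdw, hcons]; exact List.cons_ne_nil _ _
    have hsemi : L[(L.takeWhile (· != ';')).length] = ';' := by
      have hh := List.head_dropWhile_not (· != ';') hne
      simp only [hdw, hcons, List.head_cons] at hh
      simpa using hh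
    have hpre1 : [';'] <+: L.drop (L.takeWhile (· != ';')).length := by
      rw [pv_singleton_prefix, List.getElem?_drop]
      rw [Nat.add_zero, List.getElem?_eq_getElem htl, hsemi]
    have h0 : 0 ≤ PySem.Chars.find L [';'] :=
      (PySem.Chars.find_nonneg_iff L [';']).mpr
        (hpre1.isInfix.trans (List.drop_suffix _ _).isInfix)
    obtain ⟨hpre, hmin⟩ := PySem.Chars.find_spec h0
    have h1 : L[(PySem.Chars.find L [';']).toNat]? = some ';' := by
      have := (pv_singleton_prefix ';' _).mp hpre
      rwa [List.getElem?_drop, Nat.add_zero] at this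
    have hge : (L.takeWhile (· != ';')).length ≤ (PySem.Chars.find L [';']).toNat := by
      by_contra hlt'
      push_neg at hlt'
      have hlen : (PySem.Chars.find L [';']).toNat < L.length := by omega
      have hel : L[(PySem.Chars.find L [';']).toNat] = ';' := by
        rw [List.getElem?_eq_getElem hlen] at h1
        exact Option.some_injective _ h1
      have e := (List.takeWhile_prefix (p := (· != ';')) (l := L)).getElem hlt'
      have hp := List.mem_takeWhile_imp (p := (· != ';')) (l := L)
        (x := (L.takeWhile (· != ';'))[(PySem.Chars.find L [';']).toNat]'hlt')
        (List.getElem_mem hlt')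
      rw [e] at hp
      simp at hp
      exact hp hel
    have hle : (PySem.Chars.find L [';']).toNat ≤ (L.takeWhile (· != ';')).length := by
      by_contra hlt'
      push_neg at hlt'
      exact hmin _ hlt' hpre1
    omega

lemma pvB_tokens_eq (es : List Char) (j : Nat) :
    pvB_tokens es j = pvB_tokensAux (es.drop j) := by
  rw [pvB_tokens]
  by_cases h : j < es.length
  · rw [dif_pos h]
    have hdrop : es.drop j = es[j] :: es.drop (j + 1) := (List.getElem_cons_drop h).symm
    by_cases ha : es[j] = '&'
    · rw [if_pos ha]
      have hlenL : (es.drop (j + 1)).length = es.length - (j + 1) := List.length_drop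
      have hk0 : PySem.Chars.findFrom es [';'] ((j + 1 : Nat) : Int)
          = if ((es.drop (j + 1)).takeWhile (· != ';')).length = (es.drop (j + 1)).length
            then -1
            else ((j + 1 + ((es.drop (j + 1)).takeWhile (· != ';')).length : Nat) : Int) := by
        rw [PySem.Chars.findFrom_natCast es [';'] (j + 1) (by omega), pv_find_semi]
        by_cases hcc : ((es.drop (j + 1)).takeWhile (· != ';')).length = (es.drop (j + 1)).length
        · rw [if_pos hcc, if_pos hcc, if_pos rfl]
        · rw [if_neg hcc, if_neg hcc, if_neg (by omega)]
          push_cast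
          ring
      by_cases hfull : ((es.drop (j + 1)).takeWhile (· != ';')).length = (es.drop (j + 1)).length
      · have hk0' : PySem.Chars.findFrom es [';'] ((j + 1 : Nat) : Int) = -1 := by
          rw [hk0, if_pos hfull]
        rw [hk0']
        dsimp only
        rw [if_pos rfl]
        have hdwnil : (es.drop (j + 1)).dropWhile (· != ';') = [] := by
          rw [pv_dropWhile_eq_drop, hfull, List.drop_length]
        have hsplit : es.drop (j + 1) = (es.drop (j + 1)).takeWhile (· != ';') := by
          conv_lhs => rw [← List.takeWhile_append_dropWhile (p := (· != ';')) (l := es.drop (j + 1))]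
          rw [hdwnil, List.append_nil]
        have hent : PySem.List.slice es (some (j : Int)) (some ((es.length : Nat) : Int))
            = '&' :: (es.drop (j + 1)).takeWhile (· != ';') := by
          rw [PySem.List.slice_natCast]
          have harith : es.length - j = ((es.drop (j + 1)).takeWhile (· != ';')).length + 1 := by
            omega
          rw [harith, hdrop, ha, List.take_succ_cons]
          exact congrArg _ (List.prefix_iff_eq_take.mp (List.takeWhile_prefix _)).symm
        rw [hent, hdrop, ha, pvB_tokensAux_amp_none _ hdwnil,
            pvB_tokens_eq es es.length, List.drop_length, pvB_tokensAux_nil]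
      · have htl : ((es.drop (j + 1)).takeWhile (· != ';')).length < (es.drop (j + 1)).length :=
          lt_of_le_of_ne (List.takeWhile_prefix _).length_le hfull
        have hlt : j + 1 + ((es.drop (j + 1)).takeWhile (· != ';')).length < es.length := by
          omega
        have hk0' : PySem.Chars.findFrom es [';'] ((j + 1 : Nat) : Int)
            = ((j + 1 + ((es.drop (j + 1)).takeWhile (· != ';')).length : Nat) : Int) := by
          rw [hk0, if_neg hfull]
        rw [hk0']
        dsimp only
        rw [if_neg (by omega)]
        have htoNat : ((j + 1 + ((es.drop (j + 1)).takeWhile (· != ';')).length : Nat) : Int).toNat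
            = j + 1 + ((es.drop (j + 1)).takeWhile (· != ';')).length := Int.toNat_natCast _
        rw [htoNat]
        have hdw : (es.drop (j + 1)).dropWhile (· != ';')
            = es.drop (j + 1 + ((es.drop (j + 1)).takeWhile (· != ';')).length) := by
          rw [pv_dropWhile_eq_drop, List.drop_drop]
        have hcons : es.drop (j + 1 + ((es.drop (j + 1)).takeWhile (· != ';')).length)
            = es[j + 1 + ((es.drop (j + 1)).takeWhile (· != ';')).length]
              :: es.drop (j + 1 + ((es.drop (j + 1)).takeWhile (· != ';')).length + 1) :=
          (List.getElem_cons_drop hlt).symm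
        have hne : (es.drop (j + 1)).dropWhile (· != ';') ≠ [] := by
          rw [hdw, hcons]; exact List.cons_ne_nil _ _
        have hsemi : es[j + 1 + ((es.drop (j + 1)).takeWhile (· != ';')).length] = ';' := by
          have hh := List.head_dropWhile_not (· != ';') hne
          simp only [hdw, hcons, List.head_cons] at hh
          simpa using hh
        have hent : PySem.List.slice es (some (j : Int))
              (some ((j + 1 + ((es.drop (j + 1)).takeWhile (· != ';')).length + 1 : Nat) : Int))
            = '&' :: (es.drop (j + 1)).takeWhile (· != ';') ++ [';'] := by
          rw [PySem.List.slice_natCast, hdrop, ha]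
          have harith : j + 1 + ((es.drop (j + 1)).takeWhile (· != ';')).length + 1 - j
              = ((es.drop (j + 1)).takeWhile (· != ';')).length + 1 + 1 := by omega
          rw [harith, List.take_succ_cons, pv_take_takeWhile_succ (· != ';') (es.drop (j + 1)),
              hdw, hcons, hsemi]
          simp
        rw [hent, hdrop, ha,
            pvB_tokensAux_amp_cons _ ';' _ (by rw [hdw, hcons, hsemi]),
            pvB_tokens_eq es (j + 1 + ((es.drop (j + 1)).takeWhile (· != ';')).length + 1)]
    · rw [if_neg ha, hdrop, pvB_tokensAux_char _ _ ha, pvB_tokens_eq es (j + 1)]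
  · rw [dif_neg h, List.drop_eq_nil_iff.mpr (by omega), pvB_tokensAux_nil]
termination_by es.length - j
decreasing_by all_goals omega


-- ===== VERDICT (by name: the statement is the Claim_ definition above) =====
theorem safe_html_wrap_py_spec : Claim_equal_safe_html_wrap_py := by
  intro text mw compact _
  unfold Spec_safe_html_wrap_py safe_html_wrap_py safe_html_wrap_py_alt
  rw [pv_escape_eq]
  by_cases hc : compact = true
  · rw [if_pos hc, if_pos (Or.inl hc)]
  · rw [if_neg hc]
    by_cases hl : ((text.toList.flatMap pvB_escChar).length : Int) ≤ mw
    · rw [if_pos hl, if_pos (Or.inr hl)]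
    · rw [if_neg hl, if_neg (by tauto), pv_loop_eq, pvB_tokens_eq, List.drop_zero]
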